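-- pv_equiv track=rewrite | github.com/markramm/KleptocracyTimeline | save_events_to_timeline.py | create_timeline_event_id
-- ===== SOURCE A (Python) =====
-- from typing import List, Dict
--
-- def create_timeline_event_id(event_data: Dict) -> str:
--     """Create a unique ID for a timeline event"""
--     date = event_data.get('date', '2025-01-01')
--     title = event_data.get('title', 'unknown-event')
--
--     # Clean title for filename
--     clean_title = title.lower()
--     clean_title = ''.join(c if c.isalnum() or c in '-_' else '-' for c in clean_title)
--     clean_title = '-'.join(word for word in clean_title.split('-') if word)
--     clean_title = clean_title[:60]  # Limit length
--
--     return f"{date}--{clean_title}"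
-- ===== SOURCE B (Python) =====
-- def create_timeline_event_id(event_data):
--     """Create a unique ID for a timeline event"""
--     date = event_data.get('date', '2025-01-01')
--     title = event_data.get('title', 'unknown-event')
--
--     out = []
--     pending = False
--     for c in title.lower():
--         if c.isalnum() or c == '_':
--             if out and pending:
--                 out.append('-')
--             out.append(c)
--             pending = False
--         else:
--             pending = True
--     return f"{date}--{''.join(out)[:60]}"
-- ===== Notes on version B (the rewrite author's own statement) =====
-- stated objective: alternative
-- what changed: Replaces the three-step clean (per-char map to dashes, split('-')/filter/join to collapse, then truncate) with one accumulating scan over the lowered title using a pending-dash flag, emitting a separator dash only between words.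
import Mathlib
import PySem

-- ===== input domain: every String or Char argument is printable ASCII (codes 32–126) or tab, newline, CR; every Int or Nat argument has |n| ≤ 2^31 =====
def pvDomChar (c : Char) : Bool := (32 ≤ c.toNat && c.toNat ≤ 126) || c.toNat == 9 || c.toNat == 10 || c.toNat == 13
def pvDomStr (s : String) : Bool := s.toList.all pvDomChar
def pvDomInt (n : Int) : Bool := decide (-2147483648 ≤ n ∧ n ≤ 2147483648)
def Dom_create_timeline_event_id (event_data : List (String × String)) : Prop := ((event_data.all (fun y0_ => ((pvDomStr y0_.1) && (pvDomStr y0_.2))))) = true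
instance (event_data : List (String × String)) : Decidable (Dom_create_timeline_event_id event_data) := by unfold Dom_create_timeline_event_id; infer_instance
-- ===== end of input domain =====

-- B replaces A's three-step title clean (char map, split/filter/join, truncate) with a
-- single accumulating scan using a pending-dash flag; same cost, different decomposition.


-- ===== PORT A =====
def create_timeline_event_id (event_data : List (String × String)) : String :=
  let date := PySem.Dict.getD (PySem.Dict.mk event_data) "date" "2025-01-01"
  let title := PySem.Dict.getD (PySem.Dict.mk event_data) "title" "unknown-event"
  let clean₁ : List Char := PySem.Chars.lower title.toList
  -- ''.join(c if c.isalnum() or c in '-_' else '-' for c in clean_title); 'c in "-_"' on a single char is membership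
  let clean₂ : List Char := clean₁.map (fun c => if PySem.Chars.isalnum c || c == '-' || c == '_' then c else '-')
  -- '-'.join(word for word in clean_title.split('-') if word)
  let clean₃ : List Char := PySem.Chars.join ['-'] ((PySem.Chars.splitOn clean₂ ['-']).filter (· ≠ []))
  let clean₄ : List Char := PySem.List.slice clean₃ none (some 60)
  date ++ "--" ++ String.ofList clean₄

-- ===== PORT B =====
def create_timeline_event_id_alt (event_data : List (String × String)) : String :=
  let date := PySem.Dict.getD (PySem.Dict.mk event_data) "date" "2025-01-01"
  let title := PySem.Dict.getD (PySem.Dict.mk event_data) "title" "unknown-event"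
  let st : List Char × Bool :=
    (PySem.Chars.lower title.toList).foldl
      (fun (s : List Char × Bool) c =>
        if PySem.Chars.isalnum c || c == '_' then
          ((if s.1 ≠ [] ∧ s.2 then s.1 ++ ['-'] else s.1) ++ [c], false)
        else (s.1, true))
      ([], false)
  date ++ "--" ++ String.ofList (st.1.take 60)

-- ===== PRECONDITION & SPEC =====
def Spec_create_timeline_event_id (event_data : List (String × String)) (out : String) : Prop := out = create_timeline_event_id_alt event_data
instance (event_data : List (String × String)) (out : String) : Decidable (Spec_create_timeline_event_id event_data out) := by unfold Spec_create_timeline_event_id; infer_instance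

-- ===== CLAIM (what is proved, stated in full; the proofs are below) =====
def Claim_equal_create_timeline_event_id : Prop := ∀ (event_data : List (String × String)), Dom_create_timeline_event_id event_data → Spec_create_timeline_event_id event_data (create_timeline_event_id event_data)

-- ===== LEMMAS AND PROOFS =====

/-- word character: kept by both cleanings ('-' is a separator, '_' a word char) -/
def wordChar (c : Char) : Bool := PySem.Chars.isalnum c || c == '_'

/-- reference split: `splitD pre cs` = the pieces of `pre ++ cs` cut at `'-'` (pre already read) -/
def splitD (pre : List Char) : List Char → List (List Char)
  | [] => [pre]
  | c :: rest => if c = '-' then pre :: splitD [] rest else splitD (pre ++ [c]) rest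

mutual
/-- chars emitted by B's scan while a word is open (out ≠ [], pending = false) -/
def contB : List Char → List Char
  | [] => []
  | c :: r => if wordChar c then c :: contB r else dshB r
/-- chars emitted by B's scan between words (out ≠ [], pending = true) -/
def dshB : List Char → List Char
  | [] => []
  | c :: r => if wordChar c then '-' :: c :: contB r else dshB r
end

/-- chars emitted by B's scan from the empty state -/
def startB : List Char → List Char
  | [] => []
  | c :: r => if wordChar c then c :: contB r else startB r

theorem splitOn_go_eq (fuel : Nat) (l cur : List Char) (acc : List (List Char)) (h : l.length < fuel) :
    PySem.Chars.splitOn.go ['-'] fuel l cur acc = acc.reverse ++ splitD cur.reverse l := by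
  induction fuel generalizing l cur acc with
  | zero => omega
  | succ n ih =>
    cases l with
    | nil => simp [PySem.Chars.splitOn.go, splitD]
    | cons c rest =>
      rw [PySem.Chars.splitOn.go]
      by_cases hc : c = '-'
      · subst hc
        simp [ih rest [] (cur.reverse :: acc) (by simpa using Nat.lt_of_succ_lt_succ h), splitD]
      · have : (['-'].isPrefixOf (c :: rest)) = false := by
          simp [List.isPrefixOf]; intro h'; exact absurd h'.symm hc
        simp only [this, Bool.false_eq_true, if_false]
        rw [ih rest (c :: cur) acc (by simpa using Nat.lt_of_succ_lt_succ h)]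
        simp [splitD, hc]

theorem splitOn_eq_splitD (cs : List Char) :
    PySem.Chars.splitOn cs ['-'] = splitD [] cs := by
  rw [PySem.Chars.splitOn, splitOn_go_eq (cs.length+1) cs [] [] (by omega)]
  simp

theorem map_clean_eq (cs : List Char) :
    cs.map (fun c => if PySem.Chars.isalnum c || c == '-' || c == '_' then c else '-')
      = cs.map (fun c => if wordChar c then c else '-') := by
  apply List.map_congr_left
  intro c _
  by_cases hc : c = '-'
  · subst hc; simp [wordChar]
  · simp [wordChar, hc]

theorem dshB_eq (cs : List Char) :
    dshB cs = if startB cs = [] then [] else '-' :: startB cs := by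
  induction cs with
  | nil => simp [dshB, startB]
  | cons c r ih =>
    by_cases hc : wordChar c
    · simp [dshB, startB, hc]
    · simp [dshB, startB, hc, ih]

theorem not_dash_of_wordChar {c : Char} (h : wordChar c = true) : c ≠ '-' := by
  intro hc; subst hc; simp [wordChar, PySem.Chars.isalnum, PySem.Chars.isalpha,
    PySem.Chars.isdigit, PySem.Chars.isupper, PySem.Chars.islower] at h

theorem join_cons (a : List Char) (M : List (List Char)) :
    PySem.Chars.join ['-'] (a :: M) = a ++ (if M = [] then [] else '-' :: PySem.Chars.join ['-'] M) := by
  cases M with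
  | nil => simp [PySem.Chars.join, List.intercalate]
  | cons b M' => simp [PySem.Chars.join, List.intercalate, List.intersperse]

theorem startB_ne_nil_aux (cs : List Char) (M : List (List Char))
    (hM : ∀ x ∈ M, x ≠ []) (hjoin : PySem.Chars.join ['-'] M = startB cs) :
    (M = []) ↔ (startB cs = []) := by
  cases M with
  | nil => simp [PySem.Chars.join, List.intercalate] at hjoin; simp [← hjoin]
  | cons b M' =>
    have hb : b ≠ [] := hM b (by simp)
    rw [join_cons] at hjoin
    constructor
    · intro h; cases h
    · intro h; rw [← hjoin] at h; cases b with
      | nil => exact absurd rfl hb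
      | cons x xs => simp at h

theorem join_filter_splitD (cs : List Char) :
    (∀ pre : List Char, pre ≠ [] →
      PySem.Chars.join ['-'] ((splitD pre (cs.map (fun c => if wordChar c then c else '-'))).filter (· ≠ [])) = pre ++ contB cs)
    ∧ PySem.Chars.join ['-'] ((splitD [] (cs.map (fun c => if wordChar c then c else '-'))).filter (· ≠ [])) = startB cs := by
  induction cs with
  | nil =>
    constructor
    · intro pre hpre
      simp [splitD, List.filter, hpre, contB, PySem.Chars.join, List.intercalate]
    · simp [splitD, startB, PySem.Chars.join, List.intercalate]
  | cons c r ih =>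
    obtain ⟨ih1, ih2⟩ := ih
    by_cases hc : wordChar c
    · have hcd : c ≠ '-' := not_dash_of_wordChar hc
      constructor
      · intro pre hpre
        simp only [List.map_cons, hc, if_pos, splitD, hcd, contB, if_false]
        rw [ih1 (pre ++ [c]) (by simp)]
        simp
      · simp only [List.map_cons, hc, if_pos, splitD, hcd, startB, if_false]
        rw [show ([] : List Char) ++ [c] = [c] from rfl, ih1 [c] (by simp)]
        simp
    · constructor
      · intro pre hpre
        simp only [List.map_cons, hc, Bool.false_eq_true, if_false, splitD, if_pos, contB]
        have hfil : (pre :: splitD [] (r.map (fun c => if wordChar c then c else '-'))).filter (· ≠ [])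
            = pre :: (splitD [] (r.map (fun c => if wordChar c then c else '-'))).filter (· ≠ []) := by
          simp [List.filter, hpre]
        rw [hfil, join_cons]
        have hiff := startB_ne_nil_aux r _ (by intro x hx; simpa using (List.of_mem_filter hx)) ih2
        rw [dshB_eq]
        by_cases hs : startB r = []
        · rw [if_pos (hiff.mpr hs), if_pos hs]
        · rw [if_neg (fun h => hs (hiff.mp h)), if_neg hs, ih2]
      · simp only [List.map_cons, hc, Bool.false_eq_true, if_false, splitD, if_pos, startB]
        have : (([] : List Char) :: splitD [] (r.map (fun c => if wordChar c then c else '-'))).filter (· ≠ [])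
            = (splitD [] (r.map (fun c => if wordChar c then c else '-'))).filter (· ≠ []) := by
          simp [List.filter]
        rw [this, ih2]

theorem foldB_eq (cs : List Char) (out : List Char) (pending : Bool) :
    (cs.foldl (fun (s : List Char × Bool) c =>
        if PySem.Chars.isalnum c || c == '_' then
          ((if s.1 ≠ [] ∧ s.2 then s.1 ++ ['-'] else s.1) ++ [c], false)
        else (s.1, true)) (out, pending)).1
      = if out = [] then out ++ startB cs else out ++ (if pending then dshB cs else contB cs) := by
  induction cs generalizing out pending with
  | nil => cases pending <;> simp [startB, dshB, contB]
  | cons c r ih =>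
    by_cases hc : wordChar c
    · have hc' : (PySem.Chars.isalnum c || c == '_') = true := hc
      simp only [List.foldl_cons, hc', if_pos]
      by_cases ho : out = []
      · subst ho
        simp only [ne_eq, not_true_eq_false, false_and, if_neg, not_false_iff]
        rw [ih]
        simp [startB, hc]
      · cases pending with
        | false =>
          simp only [ho, ne_eq, not_false_iff, true_and, if_neg]
          rw [ih]
          simp [ho, contB, hc]
        | true =>
          simp only [ho, ne_eq, not_false_iff, and_true, if_pos]
          rw [ih]
          simp [ho, dshB, hc]
    · have hc' : (PySem.Chars.isalnum c || c == '_') = false := by simpa [wordChar] using hc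
      simp only [List.foldl_cons, hc', Bool.false_eq_true, if_false]
      rw [ih]
      by_cases ho : out = []
      · simp [ho, startB, hc]
      · cases pending <;> simp [ho, contB, dshB, hc, dshB_eq]

-- ===== VERDICT (by name: the statement is the Claim_ definition above) =====
theorem create_timeline_event_id_spec : Claim_equal_create_timeline_event_id := by
  intro ev _
  unfold Spec_create_timeline_event_id create_timeline_event_id create_timeline_event_id_alt
  simp only [map_clean_eq, splitOn_eq_splitD, (join_filter_splitD _).2, foldB_eq]
  simp [PySem.List.slice, List.take_eq_take_min]
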